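-- pv_equiv track=rewrite | github.com/wseungjin/codingTest | kakao/2019_winter/crossStone.py | solution
-- ===== SOURCE A (Python) =====
-- def solution(stones, k):
--     min = stones[0]
--     for stone in stones:
--         if(min>stone):
--             min = stone
--
--     for cur in range(len(stones)):
--         stones[cur] = stones[cur] - min
--     answer = min
--
--     oneCycle = True
--     while(oneCycle):
--         cur = -1
--         oneCycle = True
--         while cur <len(stones):
--             flag = False
--             nextPosition = 1
--             for plus in range(1,k+1):
--                 if(cur+plus >= len(stones)):
--                     flag = True
--                     nextPosition = plus
--                     break
--                 elif(stones[cur+plus]==0):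
--                     continue
--                 else:
--                     stones[cur+plus] = stones[cur+plus] - 1
--                     flag = True
--                     nextPosition = plus
--                     break
--             if flag:
--                 cur = cur + nextPosition
--             else:
--                 oneCycle = False
--                 break
--         if oneCycle:
--             answer = answer + 1
--
--
--
--
--     return answer
-- ===== SOURCE B (Python) =====
-- def solution(stones, k):
--     # max people crossing = min over every window of w consecutive stones of the window maximum;
--     # a step always advances at least one stone, so the effective window size is max(k, 1)
--     # (for k < 1 this gives min(stones), the same value A returns there)
--     w = max(k, 1)
--     return min(max(stones[i:i + w]) for i in range(len(stones) - w + 1))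
-- ===== Notes on version B (the rewrite author's own statement) =====
-- stated objective: faster
-- what changed: A simulates each crossing person one by one, mutating the stone array and greedily jumping to the nearest usable stone within k; B computes the answer directly as the minimum over all windows of max(k,1) consecutive stones of the window maximum, with no simulation and no mutation. Pre_ excludes only the empty list (A raises IndexError) and k > len(stones) (A loops forever).
import Mathlib
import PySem

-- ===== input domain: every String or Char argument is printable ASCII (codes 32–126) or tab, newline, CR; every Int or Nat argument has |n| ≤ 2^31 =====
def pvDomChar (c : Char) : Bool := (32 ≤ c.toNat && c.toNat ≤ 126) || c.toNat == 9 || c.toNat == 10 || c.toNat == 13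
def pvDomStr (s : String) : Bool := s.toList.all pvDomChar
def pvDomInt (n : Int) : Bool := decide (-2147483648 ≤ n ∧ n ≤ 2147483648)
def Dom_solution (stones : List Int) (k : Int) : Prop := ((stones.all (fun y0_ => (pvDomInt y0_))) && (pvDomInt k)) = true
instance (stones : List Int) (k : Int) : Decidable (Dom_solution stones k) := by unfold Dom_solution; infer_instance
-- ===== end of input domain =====

-- B replaces A's person-by-person greedy simulation (which mutates the list and runs O(n · answer))
-- by the closed form min over all k-windows of the window maximum; equivalence is about the RETURN
-- value only (Python A mutates its `stones` argument in place, B does not).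

-- ===== PORT A =====
-- A-side: the inner `for plus in range(1, k+1)` loop body; returns (nextPosition, updated stones)
-- when flag becomes True, none when the for-loop falls through (flag stays False).
-- Index cur+plus is in range 0 ≤ cur+plus < len whenever it is read, so pyGetD/pySetD are exact.
def solFind (r : List Int) (cur : Int) : List Int → Option (Int × List Int)
  | [] => none
  | p :: rest =>
    if (r.length : Int) ≤ cur + p then some (p, r)
    else if PySem.List.pyGetD r (cur + p) 0 = 0 then solFind r cur rest
    else some (p, PySem.List.pySetD r (cur + p) (PySem.List.pyGetD r (cur + p) 0 - 1))

-- A-side: the inner `while cur < len(stones)` loop; fuel is only a totality device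
-- (len(stones)+2 suffices, since cur strictly increases — proved below).
def solCross (k : Int) : Nat → Int → List Int → Bool × List Int
  | 0, _, r => (true, r)
  | fuel + 1, cur, r =>
    if cur < (r.length : Int) then
      match solFind r cur (PySem.List.pyRange 1 (k + 1) 1) with
      | some (p, r') => solCross k fuel (cur + p) r'
      | none => (false, r)
    else (true, r)

-- A-side: the outer `while oneCycle` loop; fuel is only a totality device
-- (on Pre_ inputs, sum of residual stones + 1 suffices — proved below).
def solOuter (k : Int) : Nat → List Int → Int → Int
  | 0, _, answer => answer
  | fuel + 1, r, answer =>
    match solCross k (r.length + 2) (-1) r with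
    | (true, r') => solOuter k fuel r' (answer + 1)
    | (false, _) => answer

def solution (stones : List Int) (k : Int) : Int :=
  match stones with
  | [] => 0  -- Python raises IndexError on stones[0]; excluded by Pre_solution
  | s0 :: _ =>
    let m := stones.foldl (fun a x => if a > x then x else a) s0
    let r := stones.map (fun x => x - m)
    solOuter k ((r.foldl (· + ·) 0).toNat + 1) r m

-- ===== PORT B =====
-- w = max(k, 1); min(max(stones[i:i+w]) for i in range(len(stones)-w+1)); the .getD 0 defaults
-- are only reached where Python's min/max raise ValueError (excluded by Pre_solution).
def solution_alt (stones : List Int) (k : Int) : Int :=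
  let w := max k 1
  (PySem.List.min?
      ((PySem.List.pyRange 0 ((stones.length : Int) - w + 1) 1).map
        (fun i => (PySem.List.max? (PySem.List.slice stones (some i) (some (i + w))) (fun y => y)).getD 0))
      (fun y => y)).getD 0

-- ===== PRECONDITION & SPEC =====
-- Pre_ excludes only: [] (A raises IndexError) and k > len(stones) (A loops forever).
def Pre_solution (stones : List Int) (k : Int) : Prop :=
  stones ≠ [] ∧ k ≤ (stones.length : Int)
instance (stones : List Int) (k : Int) : Decidable (Pre_solution stones k) := by
  unfold Pre_solution; infer_instance

def pvWitness_solution : List Int × Int := ([2, 5, 1, 4], 2)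

def Spec_solution (stones : List Int) (k : Int) (out : Int) : Prop := out = solution_alt stones k
instance (stones : List Int) (k : Int) (out : Int) : Decidable (Spec_solution stones k out) := by
  unfold Spec_solution; infer_instance

-- ===== CLAIM (what is proved, stated in full; the proofs are below) =====
def Claim_equal_solution : Prop := ∀ (stones : List Int) (k : Int), Dom_solution stones k → Pre_solution stones k → Spec_solution stones k (solution stones k)

-- ===== LEMMAS AND PROOFS =====

-- window spec: maximum of a window, list of windows, min of window maxima
def pvWmax (l : List Int) : Int := (PySem.List.max? l (fun y => y)).getD 0
def pvWins (r : List Int) (K : Nat) : List (List Int) :=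
  (List.range (r.length - K + 1)).map (fun i => (r.drop i).take K)
def pvMW (r : List Int) (K : Nat) : Int :=
  (PySem.List.min? ((pvWins r K).map pvWmax) (fun y => y)).getD 0

-- A's first loop computes a lower bound of all elements
theorem pv_minfold_le (l : List Int) : ∀ a : Int,
    l.foldl (fun a x => if a > x then x else a) a ≤ a ∧
    ∀ x ∈ l, l.foldl (fun a x => if a > x then x else a) a ≤ x := by
  induction l with
  | nil => intro a; exact ⟨le_refl _, by simp⟩
  | cons y t ih =>
    intro a
    simp only [List.foldl_cons]
    obtain ⟨h1, h2⟩ := ih (if a > y then y else a)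
    refine ⟨le_trans h1 (by split_ifs <;> omega), ?_⟩
    intro x hx
    rcases List.mem_cons.mp hx with rfl | hx
    · exact le_trans h1 (by split_ifs <;> omega)
    · exact h2 x hx

-- foldl max over nonneg list with nonneg accumulator
theorem pv_foldl_max_facts (l : List Int) : ∀ a : Int,
    a ≤ l.foldl max a ∧ ∀ x ∈ l, x ≤ l.foldl max a := by
  induction l with
  | nil => intro a; exact ⟨le_refl _, by simp⟩
  | cons y t ih =>
    intro a
    simp only [List.foldl_cons]
    obtain ⟨h1, h2⟩ := ih (max a y)
    refine ⟨le_trans (le_max_left a y) h1, ?_⟩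
    intro x hx
    rcases List.mem_cons.mp hx with rfl | hx
    · exact le_trans (le_max_right a x) h1
    · exact h2 x hx

theorem pv_wmax_cons (x : Int) (t : List Int) : pvWmax (x :: t) = t.foldl max x := by
  simp [pvWmax, PySem.List.max?_id_cons]

theorem pv_wmin_getD_cons (x : Int) (t : List Int) :
    (PySem.List.min? (x :: t) (fun y => y)).getD 0 = t.foldl min x := by
  simp [PySem.List.min?_id_cons]

-- pvWmax of a nonempty nonneg list as foldl max 0
theorem pv_wmax_nonneg_foldl (l : List Int) (hnn : ∀ x ∈ l, 0 ≤ x) :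
    pvWmax l = l.foldl max 0 := by
  cases l with
  | nil => simp [pvWmax, PySem.List.max?]
  | cons x t =>
    rw [pv_wmax_cons]
    simp only [List.foldl_cons]
    have : max 0 x = x := max_eq_right (hnn x (by simp))
    rw [this]

theorem pv_wmax_nonneg (l : List Int) (hnn : ∀ x ∈ l, 0 ≤ x) : 0 ≤ pvWmax l := by
  rw [pv_wmax_nonneg_foldl l hnn]
  exact (pv_foldl_max_facts l 0).1

theorem pv_wmax_zero_iff (l : List Int) (hnn : ∀ x ∈ l, 0 ≤ x) :
    pvWmax l = 0 ↔ ∀ x ∈ l, x = 0 := by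
  rw [pv_wmax_nonneg_foldl l hnn]
  constructor
  · intro h x hx
    have h1 := (pv_foldl_max_facts l 0).2 x hx
    have h2 := hnn x hx
    omega
  · intro h
    rcases PySem.List.foldl_max_mem l 0 with h0 | hm
    · exact h0
    · exact h _ hm

-- shift lemmas: foldl max / foldl min commute with adding a constant
theorem pv_foldl_max_shift (l : List Int) (c : Int) : ∀ a : Int,
    (l.map (· + c)).foldl max (a + c) = l.foldl max a + c := by
  induction l with
  | nil => intro a; simp
  | cons y t ih =>
    intro a
    simp only [List.map_cons, List.foldl_cons]
    rw [max_add_add_right, ih]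

theorem pv_foldl_min_shift (l : List Int) (c : Int) : ∀ a : Int,
    (l.map (· + c)).foldl min (a + c) = l.foldl min a + c := by
  induction l with
  | nil => intro a; simp
  | cons y t ih =>
    intro a
    simp only [List.map_cons, List.foldl_cons]
    rw [min_add_add_right, ih]

theorem pv_wmax_shift (l : List Int) (c : Int) (hl : l ≠ []) :
    pvWmax (l.map (· + c)) = pvWmax l + c := by
  cases l with
  | nil => exact absurd rfl hl
  | cons x t =>
    simp only [List.map_cons]
    rw [pv_wmax_cons, pv_wmax_cons, pv_foldl_max_shift]

theorem pv_min_getD_shift (L : List Int) (c : Int) (hL : L ≠ []) :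
    (PySem.List.min? (L.map (· + c)) (fun y => y)).getD 0 =
      (PySem.List.min? L (fun y => y)).getD 0 + c := by
  cases L with
  | nil => exact absurd rfl hL
  | cons x t =>
    simp only [List.map_cons]
    rw [pv_wmin_getD_cons, pv_wmin_getD_cons, pv_foldl_min_shift]

-- sum bound: every element of a nonneg list is ≤ its foldl-sum, and the sum is nonneg
theorem pv_foldl_sum_facts (l : List Int) (hnn : ∀ x ∈ l, 0 ≤ x) : ∀ a : Int, 0 ≤ a →
    a ≤ l.foldl (· + ·) a ∧ ∀ x ∈ l, x ≤ l.foldl (· + ·) a := by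
  induction l with
  | nil => intro a _; exact ⟨le_refl _, by simp⟩
  | cons y t ih =>
    intro a ha
    have hy : 0 ≤ y := hnn y (by simp)
    have hnn' : ∀ x ∈ t, 0 ≤ x := fun x hx => hnn x (List.mem_cons_of_mem _ hx)
    simp only [List.foldl_cons]
    obtain ⟨h1, h2⟩ := ih hnn' (a + y) (by omega)
    refine ⟨le_trans (by omega) h1, ?_⟩
    intro x hx
    rcases List.mem_cons.mp hx with rfl | hx
    · exact le_trans (by omega) h1
    · exact h2 x hx

-- ===== solFind characterisation =====
theorem solFind_spec (r : List Int) (cur k : Int) : ∀ a : Int, 1 ≤ a →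
    (∀ q : Int, 1 ≤ q → q < a → cur + q < (r.length : Int) ∧ PySem.List.pyGetD r (cur + q) 0 = 0) →
    (solFind r cur (PySem.List.pyRange a (k + 1) 1) = none →
       ∀ q : Int, 1 ≤ q → q ≤ k → cur + q < (r.length : Int) ∧ PySem.List.pyGetD r (cur + q) 0 = 0) ∧
    (∀ p r', solFind r cur (PySem.List.pyRange a (k + 1) 1) = some (p, r') →
       1 ≤ p ∧ p ≤ k ∧
       (∀ q : Int, 1 ≤ q → q < p → cur + q < (r.length : Int) ∧ PySem.List.pyGetD r (cur + q) 0 = 0) ∧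
       (((r.length : Int) ≤ cur + p ∧ r' = r) ∨
        (cur + p < (r.length : Int) ∧ PySem.List.pyGetD r (cur + p) 0 ≠ 0 ∧
           r' = PySem.List.pySetD r (cur + p) (PySem.List.pyGetD r (cur + p) 0 - 1)))) := by
  intro a
  generalize hN : (k + 1 - a).toNat = N
  induction N generalizing a with
  | zero =>
    intro ha hprev
    have hba : k + 1 ≤ a := by omega
    rw [PySem.List.pyRange_one_eq_nil hba]
    constructor
    · intro _ q hq1 hq2
      exact hprev q hq1 (by omega)
    · intro p r' h
      simp [solFind] at h
  | succ N ih =>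
    intro ha hprev
    have hab : a < k + 1 := by omega
    rw [PySem.List.pyRange_one_cons hab]
    simp only [solFind]
    split_ifs with hend hzero
    · -- past the end: some (a, r)
      constructor
      · intro h; simp at h
      · intro p r' h
        simp only [Option.some.injEq, Prod.mk.injEq] at h
        obtain ⟨rfl, rfl⟩ := h
        exact ⟨ha, by omega, fun q hq1 hq2 => hprev q hq1 hq2, Or.inl ⟨hend, rfl⟩⟩
    · -- zero: continue with a+1
      have hprev' : ∀ q : Int, 1 ≤ q → q < a + 1 →
          cur + q < (r.length : Int) ∧ PySem.List.pyGetD r (cur + q) 0 = 0 := by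
        intro q hq1 hq2
        by_cases hqa : q < a
        · exact hprev q hq1 hqa
        · have : q = a := by omega
          subst this
          exact ⟨by omega, hzero⟩
      exact ih (a + 1) (by omega) (by omega) hprev'
    · -- nonzero: decrement and jump
      constructor
      · intro h; simp at h
      · intro p r' h
        simp only [Option.some.injEq, Prod.mk.injEq] at h
        obtain ⟨rfl, rfl⟩ := h
        exact ⟨ha, by omega, fun q hq1 hq2 => hprev q hq1 hq2,
          Or.inr ⟨by omega, hzero, rfl⟩⟩

-- ===== solCross characterisation =====
theorem solCross_spec (k : Int) (hk1 : 1 ≤ k) : ∀ (fuel : Nat) (cur : Int) (r : List Int),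
    -1 ≤ cur → ((r.length : Int) - cur).toNat + 1 ≤ fuel → (∀ x ∈ r, 0 ≤ x) →
    (solCross k fuel cur r).2.length = r.length ∧
    (∀ j : Int, 0 ≤ j → j < (r.length : Int) → j ≤ cur →
       PySem.List.pyGetD (solCross k fuel cur r).2 j 0 = PySem.List.pyGetD r j 0) ∧
    ((solCross k fuel cur r).1 = true → ∀ j : Int, 0 ≤ j → j < (r.length : Int) → cur < j →
       (PySem.List.pyGetD r j 0 = 0 ∧ PySem.List.pyGetD (solCross k fuel cur r).2 j 0 = 0) ∨
       (1 ≤ PySem.List.pyGetD r j 0 ∧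
          PySem.List.pyGetD (solCross k fuel cur r).2 j 0 = PySem.List.pyGetD r j 0 - 1)) ∧
    ((solCross k fuel cur r).1 = false → ∃ i : Int, cur < i ∧ 0 ≤ i ∧ i + k ≤ (r.length : Int) ∧
       ∀ j : Int, i ≤ j → j < i + k → PySem.List.pyGetD r j 0 = 0) := by
  intro fuel
  induction fuel with
  | zero => intro cur r _ hfuel _; omega
  | succ fuel ih =>
    intro cur r hcur hfuel hnn
    by_cases hc : cur < (r.length : Int)
    · have hfs := solFind_spec r cur k 1 (le_refl 1) (by intro q h1 h2; omega)
      cases hfind : solFind r cur (PySem.List.pyRange 1 (k + 1) 1) with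
      | none =>
        have heq : solCross k (fuel + 1) cur r = (false, r) := by
          simp [solCross, hc, hfind]
        rw [heq]
        have zeros := hfs.1 hfind
        refine ⟨rfl, fun j _ _ _ => rfl, by intro h; simp at h, ?_⟩
        intro _
        refine ⟨cur + 1, by omega, by omega, ?_, ?_⟩
        · have hk' := (zeros k hk1 (le_refl k)).1
          omega
        · intro j hj1 hj2
          have hz := (zeros (j - cur) (by omega) (by omega)).2
          have e : cur + (j - cur) = j := by omega
          rw [e] at hz
          exact hz
      | some pr =>
        obtain ⟨p, r1⟩ := pr
        obtain ⟨hp1, hpk, hzeros, hcase⟩ := hfs.2 p r1 hfind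
        have heq : solCross k (fuel + 1) cur r = solCross k fuel (cur + p) r1 := by
          simp [solCross, hc, hfind]
        rw [heq]
        rcases hcase with ⟨hge, rfl⟩ | ⟨hlt, hne, hset⟩
        · -- jumped past the end without touching anything
          have ih' := ih (cur + p) r1 (by omega) (by omega) hnn
          refine ⟨ih'.1, ?_, ?_, ?_⟩
          · intro j h0 h1 hj
            exact ih'.2.1 j h0 h1 (by omega)
          · intro htrue j h0 h1 hj
            have hz := (hzeros (j - cur) (by omega) (by omega)).2
            have e : cur + (j - cur) = j := by omega
            rw [e] at hz
            left
            exact ⟨hz, by rw [ih'.2.1 j h0 h1 (by omega)]; exact hz⟩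
          · intro hfalse
            obtain ⟨i, hi1, hi2, hi3, hi4⟩ := ih'.2.2.2 hfalse
            exact ⟨i, by omega, hi2, hi3, hi4⟩
        · -- decremented stone at cur + p
          have h0cp : 0 ≤ cur + p := by omega
          have hv1 : 1 ≤ PySem.List.pyGetD r (cur + p) 0 := by
            have hmem : PySem.List.pyGetD r (cur + p) 0 ∈ r :=
              PySem.List.pyGetD_mem r 0 (by unfold PySem.Raise.InRange; omega)
            have := hnn _ hmem
            omega
          have hgd : ∀ j : Int, 0 ≤ j → j < (r.length : Int) →
              PySem.List.pyGetD r1 j 0 =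
                if j = cur + p then PySem.List.pyGetD r (cur + p) 0 - 1
                else PySem.List.pyGetD r j 0 := by
            intro j hj0 hj1
            have e1 : cur + p = (((cur + p).toNat : Nat) : Int) := (Int.toNat_of_nonneg h0cp).symm
            have e2 : j = ((j.toNat : Nat) : Int) := (Int.toNat_of_nonneg hj0).symm
            rw [hset, e1, e2,
              PySem.List.pyGetD_pySetD_natCast r _ _ _ _ (by omega)]
            by_cases hje : j.toNat = (cur + p).toNat
            · rw [if_pos hje, if_pos (by omega), ← e1]
            · rw [if_neg hje, if_neg (by omega), ← e2]
          have hlen1 : r1.length = r.length := by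
            rw [hset]; exact PySem.List.length_pySetD r _ _
          have hnn1 : ∀ x ∈ r1, 0 ≤ x := by
            intro x hx
            rw [hset, PySem.List.pySetD_of_nonneg r _ h0cp] at hx
            rcases List.mem_or_eq_of_mem_set hx with hx | rfl
            · exact hnn x hx
            · omega
          have ih' := ih (cur + p) r1 (by omega) (by omega) hnn1
          refine ⟨by rw [ih'.1, hlen1], ?_, ?_, ?_⟩
          · intro j h0 h1 hj
            rw [ih'.2.1 j h0 (by omega) (by omega), hgd j h0 h1, if_neg (by omega)]
          · intro htrue j h0 h1 hj
            by_cases hjp : j < cur + p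
            · have hz := (hzeros (j - cur) (by omega) (by omega)).2
              have e : cur + (j - cur) = j := by omega
              rw [e] at hz
              left
              refine ⟨hz, ?_⟩
              rw [ih'.2.1 j h0 (by omega) (by omega), hgd j h0 h1, if_neg (by omega)]
              exact hz
            · by_cases hjp2 : j = cur + p
              · right
                refine ⟨by rw [hjp2]; exact hv1, ?_⟩
                rw [ih'.2.1 j h0 (by omega) (by omega), hgd j h0 h1, if_pos hjp2, hjp2]
              · have hrel := ih'.2.2.1 htrue j h0 (by omega) (by omega)
                rw [hgd j h0 h1, if_neg (by omega)] at hrel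
                exact hrel
          · intro hfalse
            obtain ⟨i, hi1, hi2, hi3, hi4⟩ := ih'.2.2.2 hfalse
            refine ⟨i, by omega, hi2, by omega, ?_⟩
            intro j hj1 hj2
            have := hi4 j hj1 hj2
            rw [hgd j (by omega) (by omega), if_neg (by omega)] at this
            exact this
    · have heq : solCross k (fuel + 1) cur r = (true, r) := by
        simp [solCross, hc]
      rw [heq]
      refine ⟨rfl, fun j _ _ _ => rfl, ?_, by intro h; simp at h⟩
      intro _ j h0 h1 hj
      omega

theorem pv_pyGetD_pySetD (r : List Int) (t j v : Int) (ht0 : 0 ≤ t)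
    (ht1 : t < (r.length : Int)) (hj0 : 0 ≤ j) :
    PySem.List.pyGetD (PySem.List.pySetD r t v) j 0 =
      if j = t then v else PySem.List.pyGetD r j 0 := by
  have e1 : t = ((t.toNat : Nat) : Int) := (Int.toNat_of_nonneg ht0).symm
  have e2 : j = ((j.toNat : Nat) : Int) := (Int.toNat_of_nonneg hj0).symm
  rw [e1, e2, PySem.List.pyGetD_pySetD_natCast r _ _ _ _ (by omega)]
  by_cases hje : j.toNat = t.toNat
  · rw [if_pos hje, if_pos (by omega)]
  · rw [if_neg hje, if_neg (by omega), ← e2]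

-- an all-zero window ahead of cur forces failure
theorem solCross_blocked (k : Int) (hk1 : 1 ≤ k) : ∀ (fuel : Nat) (cur : Int) (r : List Int),
    -1 ≤ cur → ((r.length : Int) - cur).toNat + 1 ≤ fuel →
    ∀ i : Int, cur < i → 0 ≤ i → i + k ≤ (r.length : Int) →
    (∀ j : Int, i ≤ j → j < i + k → PySem.List.pyGetD r j 0 = 0) →
    (solCross k fuel cur r).1 = false := by
  intro fuel
  induction fuel with
  | zero => intro cur r _ hfuel i hi1 _ hik _; omega
  | succ fuel ih =>
    intro cur r hcur hfuel i hi1 hi2 hik hz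
    have hc : cur < (r.length : Int) := by omega
    have hfs := solFind_spec r cur k 1 (le_refl 1) (by intro q h1 h2; omega)
    cases hfind : solFind r cur (PySem.List.pyRange 1 (k + 1) 1) with
    | none =>
      have heq : solCross k (fuel + 1) cur r = (false, r) := by
        simp [solCross, hc, hfind]
      rw [heq]
    | some pr =>
      obtain ⟨p, r1⟩ := pr
      obtain ⟨hp1, hpk, hzeros, hcase⟩ := hfs.2 p r1 hfind
      have heq : solCross k (fuel + 1) cur r = solCross k fuel (cur + p) r1 := by
        simp [solCross, hc, hfind]
      rw [heq]
      rcases hcase with ⟨hge, rfl⟩ | ⟨hlt, hne, hset⟩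
      · -- past the end is impossible: cur + p < i + k ≤ len
        omega
      · -- the decremented stone lies strictly before the window
        have hcpi : cur + p < i := by
          by_contra hge'
          exact hne (hz (cur + p) (by omega) (by omega))
        have hlen1 : r1.length = r.length := by
          rw [hset]; exact PySem.List.length_pySetD r _ _
        apply ih (cur + p) r1 (by omega) (by omega) i (by omega) hi2 (by omega)
        intro j hj1 hj2
        rw [hset, pv_pyGetD_pySetD r _ _ _ (by omega) hlt (by omega), if_neg (by omega)]
        exact hz j hj1 hj2

-- ===== windows after one crossing =====
theorem pv_wins_subset (r : List Int) (K : Nat) (w : List Int) (hw : w ∈ pvWins r K) :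
    ∀ x ∈ w, x ∈ r := by
  obtain ⟨I, _, rfl⟩ := List.mem_map.mp hw
  intro x hx
  exact ((List.take_sublist _ _).trans (List.drop_sublist _ _)).subset hx

theorem pv_wins_ne_nil (r : List Int) (K : Nat) : pvWins r K ≠ [] := by
  simp [pvWins, List.range_eq_nil]

theorem pv_win_mem (r : List Int) (K I : Nat) (hI : I < r.length - K + 1) :
    (r.drop I).take K ∈ pvWins r K :=
  List.mem_map.mpr ⟨I, List.mem_range.mpr hI, rfl⟩

theorem pv_win_len (r : List Int) (K I : Nat) (hIK : I + K ≤ r.length) :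
    ((r.drop I).take K).length = K := by
  simp [List.length_take, List.length_drop]; omega

theorem pv_win_getElem (r : List Int) (K I t : Nat) (ht : t < K) (hIK : I + K ≤ r.length) :
    ((r.drop I).take K)[t]'(by rw [pv_win_len r K I hIK]; exact ht) = r[I + t]'(by omega) := by
  rw [List.getElem_take, List.getElem_drop]

theorem pv_mw_nonneg (r : List Int) (K : Nat) (hnn : ∀ x ∈ r, 0 ≤ x) : 0 ≤ pvMW r K := by
  unfold pvMW
  cases h : PySem.List.min? ((pvWins r K).map pvWmax) (fun y => y) with
  | none => simp
  | some m =>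
    simp only [Option.getD_some]
    obtain ⟨w, hw, rfl⟩ := List.mem_map.mp (PySem.List.min?_mem h)
    exact pv_wmax_nonneg w (fun x hx => hnn x (pv_wins_subset r K w hw x hx))

theorem pv_mw_le_sum (r : List Int) (K : Nat) (hnn : ∀ x ∈ r, 0 ≤ x) :
    pvMW r K ≤ r.foldl (· + ·) 0 := by
  have hsum := pv_foldl_sum_facts r hnn 0 (le_refl 0)
  unfold pvMW
  cases h : PySem.List.min? ((pvWins r K).map pvWmax) (fun y => y) with
  | none => simpa using hsum.1
  | some m =>
    simp only [Option.getD_some]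
    obtain ⟨w, hw, rfl⟩ := List.mem_map.mp (PySem.List.min?_mem h)
    have hnw : ∀ x ∈ w, 0 ≤ x := fun x hx => hnn x (pv_wins_subset r K w hw x hx)
    rw [pv_wmax_nonneg_foldl w hnw]
    rcases PySem.List.foldl_max_mem w 0 with h0 | hm
    · rw [h0]; exact hsum.1
    · exact hsum.2 _ (pv_wins_subset r K w hw _ hm)

theorem pv_foldl_max_rel : ∀ (a b : List Int), a.length = b.length →
    (∀ t : Nat, t < a.length →
       (a.getD t 0 = 0 ∧ b.getD t 0 = 0) ∨ (1 ≤ a.getD t 0 ∧ b.getD t 0 = a.getD t 0 - 1)) →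
    ∀ u v : Int, 0 ≤ u → v = max (u - 1) 0 → b.foldl max v = max (a.foldl max u - 1) 0 := by
  intro a
  induction a with
  | nil =>
    intro b hlen _ u v hu hv
    rw [List.length_eq_zero_iff.mp hlen.symm]
    simpa using hv
  | cons x ta ih =>
    intro b hlen hrel u v hu hv
    cases b with
    | nil => simp at hlen
    | cons y tb =>
      have h0 := hrel 0 (by simp)
      simp only [List.getD_cons_zero] at h0
      have htail : ∀ t : Nat, t < ta.length →
          (ta.getD t 0 = 0 ∧ tb.getD t 0 = 0) ∨
          (1 ≤ ta.getD t 0 ∧ tb.getD t 0 = ta.getD t 0 - 1) := by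
        intro t ht
        have := hrel (t + 1) (by simpa)
        simpa only [List.getD_cons_succ] using this
      simp only [List.foldl_cons]
      exact ih tb (by simpa using hlen) htail (max u x) (max v y) (by omega) (by omega)

theorem pv_wmax_window_step (r r' : List Int) (K I : Nat)
    (hlen : r'.length = r.length) (hIK : I + K ≤ r.length)
    (hnn : ∀ x ∈ r, 0 ≤ x)
    (hrel : ∀ j : Int, 0 ≤ j → j < (r.length : Int) →
       (PySem.List.pyGetD r j 0 = 0 ∧ PySem.List.pyGetD r' j 0 = 0) ∨
       (1 ≤ PySem.List.pyGetD r j 0 ∧ PySem.List.pyGetD r' j 0 = PySem.List.pyGetD r j 0 - 1)) :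
    pvWmax ((r'.drop I).take K) = max (pvWmax ((r.drop I).take K) - 1) 0 := by
  have hIK' : I + K ≤ r'.length := by omega
  have hgr : ∀ (t : Nat) (ht : t < K), ((r.drop I).take K).getD t 0 = r[I + t]'(by omega) := by
    intro t ht
    rw [List.getD_eq_getElem _ _ (by rw [pv_win_len r K I hIK]; exact ht),
      pv_win_getElem r K I t ht hIK]
  have hgr' : ∀ (t : Nat) (ht : t < K), ((r'.drop I).take K).getD t 0 = r'[I + t]'(by omega) := by
    intro t ht
    rw [List.getD_eq_getElem _ _ (by rw [pv_win_len r' K I hIK']; exact ht),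
      pv_win_getElem r' K I t ht hIK']
  have hrelIdx : ∀ (t : Nat) (ht : t < K),
      (r[I + t]'(by omega) = 0 ∧ r'[I + t]'(by omega) = 0) ∨
      (1 ≤ r[I + t]'(by omega) ∧ r'[I + t]'(by omega) = r[I + t]'(by omega) - 1) := by
    intro t ht
    have := hrel ((I + t : Nat) : Int) (by omega) (by omega)
    rw [PySem.List.pyGetD_eq_getElem r 0 (by omega) (by omega),
      PySem.List.pyGetD_eq_getElem r' 0 (by omega) (by omega)] at this
    simpa using this
  have hnnw : ∀ x ∈ (r.drop I).take K, 0 ≤ x :=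
    fun x hx => hnn x (pv_wins_subset r K _ (pv_win_mem r K I (by omega)) x hx)
  have hnnw' : ∀ x ∈ (r'.drop I).take K, 0 ≤ x := by
    intro x hx
    obtain ⟨t, ht, rfl⟩ := List.mem_iff_getElem.mp hx
    have ht' : t < K := by rwa [pv_win_len r' K I hIK'] at ht
    rw [pv_win_getElem r' K I t ht' hIK']
    have h1 := hrelIdx t ht'
    have h2 := hnn (r[I + t]'(by omega)) (List.getElem_mem _)
    omega
  rw [pv_wmax_nonneg_foldl _ hnnw, pv_wmax_nonneg_foldl _ hnnw']
  apply pv_foldl_max_rel _ _ (by rw [pv_win_len r K I hIK, pv_win_len r' K I hIK'])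
    _ 0 0 (le_refl 0) (by omega)
  intro t ht
  rw [pv_win_len r K I hIK] at ht
  rw [hgr t ht, hgr' t ht]
  exact hrelIdx t ht

-- success: every window max is ≥ 1 and pvMW drops by exactly one
theorem pv_mw_succ (r r' : List Int) (K : Nat) (hKn : K ≤ r.length)
    (hlen : r'.length = r.length) (hnn : ∀ x ∈ r, 0 ≤ x)
    (hrel : ∀ j : Int, 0 ≤ j → j < (r.length : Int) →
       (PySem.List.pyGetD r j 0 = 0 ∧ PySem.List.pyGetD r' j 0 = 0) ∨
       (1 ≤ PySem.List.pyGetD r j 0 ∧ PySem.List.pyGetD r' j 0 = PySem.List.pyGetD r j 0 - 1))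
    (hpos : ∀ w ∈ pvWins r K, 1 ≤ pvWmax w) :
    pvMW r' K = pvMW r K - 1 ∧ 1 ≤ pvMW r K := by
  have hL : (pvWins r' K).map pvWmax = ((pvWins r K).map pvWmax).map (· + (-1)) := by
    unfold pvWins
    rw [hlen]
    simp only [List.map_map]
    apply List.map_congr_left
    intro I hI
    have hI' : I < r.length - K + 1 := List.mem_range.mp hI
    have hIK : I + K ≤ r.length := by omega
    have hstep := pv_wmax_window_step r r' K I hlen hIK hnn hrel
    have hpos' := hpos _ (pv_win_mem r K I hI')
    simp only [Function.comp]
    omega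
  have hne : (pvWins r K).map pvWmax ≠ [] := by simp [pv_wins_ne_nil]
  have hpos1 : 1 ≤ pvMW r K := by
    unfold pvMW
    cases h : PySem.List.min? ((pvWins r K).map pvWmax) (fun y => y) with
    | none => exact absurd ((PySem.List.min?_eq_none_iff _ _).mp h) hne
    | some m =>
      simp only [Option.getD_some]
      obtain ⟨w, hw, rfl⟩ := List.mem_map.mp (PySem.List.min?_mem h)
      exact hpos w hw
  refine ⟨?_, hpos1⟩
  unfold pvMW
  rw [hL, pv_min_getD_shift _ _ hne]
  omega

-- failure: some window is all zero, so pvMW = 0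
theorem pv_mw_zero (r : List Int) (K : Nat) (hnn : ∀ x ∈ r, 0 ≤ x)
    (i : Int) (h0 : 0 ≤ i) (hiK : i + K ≤ (r.length : Int))
    (hz : ∀ j : Int, i ≤ j → j < i + K → PySem.List.pyGetD r j 0 = 0) :
    pvMW r K = 0 := by
  set I := i.toNat with hI
  have hIK : I + K ≤ r.length := by omega
  have hw : (r.drop I).take K ∈ pvWins r K := pv_win_mem r K I (by omega)
  have hwz : ∀ x ∈ (r.drop I).take K, x = 0 := by
    intro x hx
    obtain ⟨t, ht, rfl⟩ := List.mem_iff_getElem.mp hx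
    have ht' : t < K := by rwa [pv_win_len r K I hIK] at ht
    rw [pv_win_getElem r K I t ht' hIK]
    have hzj := hz ((I + t : Nat) : Int) (by omega) (by omega)
    rw [PySem.List.pyGetD_eq_getElem r 0 (by omega) (by omega)] at hzj
    simpa using hzj
  have hwmax : pvWmax ((r.drop I).take K) = 0 :=
    (pv_wmax_zero_iff _ (fun x hx => by rw [hwz x hx])).mpr hwz
  have hmem0 : (0 : Int) ∈ (pvWins r K).map pvWmax :=
    List.mem_map.mpr ⟨_, hw, hwmax⟩
  cases h : PySem.List.min? ((pvWins r K).map pvWmax) (fun y => y) with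
  | none =>
    exact absurd ((PySem.List.min?_eq_none_iff _ _).mp h)
      (by simp [pv_wins_ne_nil r K])
  | some m =>
    have hle := PySem.List.min?_isMin h _ hmem0
    obtain ⟨w', hw', rfl⟩ := List.mem_map.mp (PySem.List.min?_mem h)
    have hge := pv_wmax_nonneg w' (fun x hx => hnn x (pv_wins_subset r K w' hw' x hx))
    unfold pvMW
    rw [h]
    simp only [Option.getD_some]
    omega

-- a window with max 0 is all zero, giving the blocked condition
theorem pv_window_of_not_pos (r : List Int) (K : Nat) (hK : 1 ≤ K) (hKn : K ≤ r.length)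
    (hnn : ∀ x ∈ r, 0 ≤ x)
    (h : ¬ ∀ w ∈ pvWins r K, 1 ≤ pvWmax w) :
    ∃ i : Int, 0 ≤ i ∧ i + K ≤ (r.length : Int) ∧
      ∀ j : Int, i ≤ j → j < i + K → PySem.List.pyGetD r j 0 = 0 := by
  push Not at h
  obtain ⟨w, hw, hlt⟩ := h
  obtain ⟨I, hIr, rfl⟩ := List.mem_map.mp hw
  have hIr' : I < r.length - K + 1 := List.mem_range.mp hIr
  have hIK : I + K ≤ r.length := by omega
  have hnw : ∀ x ∈ (r.drop I).take K, 0 ≤ x :=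
    fun x hx => hnn x (pv_wins_subset r K _ (pv_win_mem r K I hIr') x hx)
  have hz : ∀ x ∈ (r.drop I).take K, x = 0 :=
    (pv_wmax_zero_iff _ hnw).mp (by have := pv_wmax_nonneg _ hnw; omega)
  refine ⟨(I : Int), by omega, by omega, ?_⟩
  intro j hj1 hj2
  have hJ : j.toNat < r.length := by omega
  rw [PySem.List.pyGetD_eq_getElem r 0 (by omega) (by omega)]
  have ht : j.toNat - I < K := by omega
  have := hz (((r.drop I).take K)[j.toNat - I]'(by rw [pv_win_len r K I hIK]; exact ht))
    (List.getElem_mem _)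
  rw [pv_win_getElem r K I (j.toNat - I) ht hIK] at this
  have eIdx : I + (j.toNat - I) = j.toNat := by omega
  simpa [eIdx] using this

-- ===== outer loop =====
theorem solOuter_spec (k : Int) (hk1 : 1 ≤ k) : ∀ (fuel : Nat) (r : List Int) (answer : Int),
    k ≤ (r.length : Int) → (∀ x ∈ r, 0 ≤ x) → (pvMW r k.toNat).toNat < fuel →
    solOuter k fuel r answer = answer + pvMW r k.toNat := by
  have ek : ((k.toNat : Nat) : Int) = k := Int.toNat_of_nonneg (by omega)
  intro fuel
  induction fuel with
  | zero => intro r answer _ _ hf; omega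
  | succ fuel ih =>
    intro r answer hkn hnn hf
    have hmw0 := pv_mw_nonneg r k.toNat hnn
    have hsc := solCross_spec k hk1 (r.length + 2) (-1) r (by omega) (by omega) hnn
    rcases hc : solCross k (r.length + 2) (-1) r with ⟨res, r1⟩
    rw [hc] at hsc
    cases res with
    | true =>
      have heq : solOuter k (fuel + 1) r answer = solOuter k fuel r1 (answer + 1) := by
        simp [solOuter, hc]
      rw [heq]
      have hlen1 : r1.length = r.length := hsc.1
      have hrel : ∀ j : Int, 0 ≤ j → j < (r.length : Int) →
          (PySem.List.pyGetD r j 0 = 0 ∧ PySem.List.pyGetD r1 j 0 = 0) ∨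
          (1 ≤ PySem.List.pyGetD r j 0 ∧
             PySem.List.pyGetD r1 j 0 = PySem.List.pyGetD r j 0 - 1) :=
        fun j h0 h1 => hsc.2.2.1 rfl j h0 h1 (by omega)
      have hnn1 : ∀ x ∈ r1, 0 ≤ x := by
        intro x hx
        obtain ⟨t, ht, rfl⟩ := List.mem_iff_getElem.mp hx
        have hr := hrel ((t : Nat) : Int) (by omega) (by omega)
        rw [PySem.List.pyGetD_eq_getElem r 0 (by omega) (by omega),
          PySem.List.pyGetD_eq_getElem r1 0 (by omega) (by omega)] at hr
        have hnr := hnn (r[((t : Nat) : Int).toNat]'(by omega)) (List.getElem_mem _)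
        simp only [Int.toNat_natCast] at hr hnr ⊢
        omega
      have hpos : ∀ w ∈ pvWins r k.toNat, 1 ≤ pvWmax w := by
        by_contra hnp
        obtain ⟨i, hi0, hiK, hz⟩ :=
          pv_window_of_not_pos r k.toNat (by omega) (by omega) hnn hnp
        have hblock := solCross_blocked k hk1 (r.length + 2) (-1) r (by omega) (by omega)
          i (by omega) hi0 (by omega) (by rw [ek] at hz; exact hz)
        rw [hc] at hblock
        simp at hblock
      have hstep := pv_mw_succ r r1 k.toNat (by omega) hlen1 hnn hrel hpos
      rw [ih r1 (answer + 1) (by omega) hnn1 (by omega)]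
      omega
    | false =>
      have heq : solOuter k (fuel + 1) r answer = answer := by
        simp [solOuter, hc]
      rw [heq]
      obtain ⟨i, _, hi0, hiK, hz⟩ := hsc.2.2.2 rfl
      have := pv_mw_zero r k.toNat hnn i hi0 (by omega) (by rw [ek]; exact hz)
      omega

-- ===== B bridge =====
theorem solution_alt_eq_mw (stones : List Int) (k : Int)
    (hkn : max k 1 ≤ (stones.length : Int)) :
    solution_alt stones k = pvMW stones (max k 1).toNat := by
  have ek : (((max k 1).toNat : Nat) : Int) = max k 1 := Int.toNat_of_nonneg (by omega)
  have hNK : (stones.length : Int) - max k 1 + 1 =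
      ((stones.length - (max k 1).toNat + 1 : Nat) : Int) := by omega
  unfold solution_alt pvMW pvWins
  simp only []
  rw [hNK, PySem.List.pyRange_zero_natCast, List.map_map, List.map_map]
  congr 1
  congr 1
  apply List.map_congr_left
  intro I _
  simp only [Function.comp]
  rw [← ek, PySem.List.slice_natCast_add stones I (max k 1).toNat]
  rfl

theorem pv_mw_map_shift (r : List Int) (K : Nat) (c : Int) (hK : 1 ≤ K) (hKn : K ≤ r.length) :
    pvMW (r.map (· + c)) K = pvMW r K + c := by
  have hL : (pvWins (r.map (· + c)) K).map pvWmax = ((pvWins r K).map pvWmax).map (· + c) := by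
    unfold pvWins
    simp only [List.length_map, List.map_map]
    apply List.map_congr_left
    intro I hI
    have hI' : I < r.length - K + 1 := List.mem_range.mp hI
    have hIK : I + K ≤ r.length := by omega
    simp only [Function.comp]
    have hwin : ((r.map (· + c)).drop I).take K = ((r.drop I).take K).map (· + c) := by
      rw [← List.map_drop, ← List.map_take]
    rw [hwin, pv_wmax_shift _ _ ?_]
    exact List.ne_nil_of_length_pos (by rw [pv_win_len r K I hIK]; omega)
  unfold pvMW
  rw [hL, pv_min_getD_shift _ _ (by simp [pv_wins_ne_nil])]

-- ===== VERDICT (by name: the statement is the Claim_ definition above) =====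
theorem pv_foldl_ifmin (l : List Int) : ∀ a : Int,
    l.foldl (fun a x => if a > x then x else a) a = l.foldl min a := by
  induction l with
  | nil => intro a; rfl
  | cons x t ih =>
    intro a
    simp only [List.foldl_cons]
    rw [show (if a > x then x else a) = min a x by omega, ih]

theorem pv_mw_one (s0 : Int) (t : List Int) : pvMW (s0 :: t) 1 = t.foldl min s0 := by
  have hmaps : (pvWins (s0 :: t) 1).map pvWmax = s0 :: t := by
    unfold pvWins
    rw [List.map_map]
    apply List.ext_getElem (by simp)
    intro i h1 h2
    simp only [List.getElem_map, List.getElem_range, Function.comp]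
    rw [List.drop_eq_getElem_cons h2]
    simp [pvWmax, PySem.List.max?_id_cons]
  unfold pvMW
  rw [hmaps, pv_wmin_getD_cons]

theorem solution_spec : Claim_equal_solution := by
  intro stones k _hdom hpre
  obtain ⟨hne, hkn⟩ := hpre
  unfold Spec_solution
  cases stones with
  | nil => exact absurd rfl hne
  | cons s0 t =>
    show solOuter k _ _ _ = _
    set m := (s0 :: t).foldl (fun a x => if a > x then x else a) s0 with hm
    set r := (s0 :: t).map (fun x => x - m) with hr
    have hmle : ∀ x ∈ (s0 :: t), m ≤ x := (pv_minfold_le (s0 :: t) s0).2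
    have hnnr : ∀ x ∈ r, 0 ≤ x := by
      intro x hx
      rw [hr] at hx
      obtain ⟨y, hy, rfl⟩ := List.mem_map.mp hx
      have := hmle y hy
      omega
    have hlenr : r.length = (s0 :: t).length := by rw [hr]; exact List.length_map ..
    by_cases hk1 : 1 ≤ k
    · -- the real domain: 1 ≤ k ≤ len(stones)
      have hmax : max k 1 = k := by omega
      have hkr : k ≤ (r.length : Int) := by rw [hlenr]; exact hkn
      have hfuel : (pvMW r k.toNat).toNat < (r.foldl (· + ·) 0).toNat + 1 := by
        have h1 := pv_mw_le_sum r k.toNat hnnr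
        have h2 := pv_mw_nonneg r k.toNat hnnr
        omega
      rw [solOuter_spec k hk1 _ r m hkr hnnr hfuel,
        solution_alt_eq_mw (s0 :: t) k (by omega), hmax]
      have hmap : r = (s0 :: t).map (· + (-m)) := by
        rw [hr]
        simp [sub_eq_add_neg]
      have hshift := pv_mw_map_shift (s0 :: t) k.toNat (-m) (by omega) (by omega)
      rw [← hmap] at hshift
      omega
    · -- k < 1: A's first crossing attempt fails at once and it returns m = min(stones);
      -- B's window size is max k 1 = 1, whose min-of-maxima is also min(stones)
      have hmax : max k 1 = 1 := by omega
      have hcross : solCross k (r.length + 2) (-1) r = (false, r) := by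
        have hnil : PySem.List.pyRange 1 (k + 1) 1 = [] :=
          PySem.List.pyRange_one_eq_nil (by omega)
        have hcur : (-1 : Int) < (r.length : Int) := by omega
        show solCross k (r.length + 1 + 1) (-1) r = (false, r)
        simp [solCross, hcur, hnil, solFind]
      have houter : solOuter k ((r.foldl (· + ·) 0).toNat + 1) r m = m := by
        simp [solOuter, hcross]
      rw [houter, solution_alt_eq_mw (s0 :: t) k (by rw [hmax]; simp), hmax]
      have hm' : m = t.foldl min s0 := by
        rw [hm, List.foldl_cons, show (if s0 > s0 then s0 else s0) = s0 by omega,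
          pv_foldl_ifmin]
      rw [show ((1 : Int)).toNat = 1 from rfl, pv_mw_one, hm']
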